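-- pv_equiv track=rewrite | github.com/rf-iasys/OEIS | OEIS_A153893.py | A153893
-- ===== SOURCE A (Python) =====
-- def A153893(n):
--     marked = []
--     current = 1
--     k = 1
--
--     while len(marked) < n:
--         k += k + current//(2*k)
--         current += k + 2
--         marked.append(k)
--
--     return marked
-- ===== SOURCE B (Python) =====
-- def A153893(n):
--     return [(3 << i) - 1 for i in range(n)]
-- ===== Notes on version B (the rewrite author's own statement) =====
-- stated objective: simpler
-- what changed: Replaces the stateful while loop threading k and current through a division-based recurrence with a one-line comprehension computing each term independently by the closed form (3 << i) - 1.
import Mathlib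
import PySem

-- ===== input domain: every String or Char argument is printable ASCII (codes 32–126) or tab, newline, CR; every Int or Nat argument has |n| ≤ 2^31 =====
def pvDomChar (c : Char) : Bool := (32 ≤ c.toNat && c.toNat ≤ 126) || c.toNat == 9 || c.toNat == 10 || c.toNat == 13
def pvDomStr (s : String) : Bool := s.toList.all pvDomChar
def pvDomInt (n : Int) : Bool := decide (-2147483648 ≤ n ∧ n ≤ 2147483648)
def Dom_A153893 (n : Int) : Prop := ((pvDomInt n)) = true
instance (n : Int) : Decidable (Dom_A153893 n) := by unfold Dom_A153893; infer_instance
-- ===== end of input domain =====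

-- B replaces A's stateful recurrence (k, current) with the closed form 3*2^i - 1 per term (simpler).

-- ===== PORT A =====
-- while len(marked) < n: k += k + current//(2*k); current += k + 2; marked.append(k)
def A153893_loop (n : Int) (marked : List Int) (current k : Int) : List Int :=
  if h : (marked.length : Int) < n then
    let k' := k + (k + PySem.Int.floordiv current (2 * k))
    A153893_loop n (marked ++ [k']) (current + (k' + 2)) k'
  else marked
termination_by n.toNat - marked.length
decreasing_by simp; omega

def A153893 (n : Int) : List Int := A153893_loop n [] 1 1

-- ===== PORT B =====
-- [(3 << i) - 1 for i in range(n)]  (3 << i is exactly 3 * 2^i on non-negative i; ported as such)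
def A153893_alt (n : Int) : List Int :=
  (PySem.List.pyRange 0 n 1).map (fun i => 3 * 2 ^ i.toNat - 1)

-- ===== PRECONDITION & SPEC =====
def Spec_A153893 (n : Int) (out : List Int) : Prop := out = A153893_alt n
instance (n : Int) (out : List Int) : Decidable (Spec_A153893 n out) := by unfold Spec_A153893; infer_instance

-- ===== CLAIM (what is proved, stated in full; the proofs are below) =====
def Claim_equal_A153893 : Prop := ∀ (n : Int), Dom_A153893 n → Spec_A153893 n (A153893 n)

-- ===== LEMMAS AND PROOFS =====

-- Loop invariant: after j+1 ≥ 1 iterations, k = 3·2^j - 1 and current = 2k + (j+1);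
-- the loop then appends exactly the terms 3·2^(j+1+i) - 1 for i < fuel.
lemma A153893_loop_inv : ∀ (fuel : Nat) (n : Int) (p : Nat) (marked : List Int),
    marked.length = p + 1 → fuel = n.toNat - (p + 1) →
    A153893_loop n marked (2 * (3 * 2 ^ p - 1) + ((p : Int) + 1)) (3 * 2 ^ p - 1)
      = marked ++ (List.range fuel).map (fun i => 3 * 2 ^ (p + 1 + i) - 1) := by
  intro fuel
  induction fuel with
  | zero =>
    intro n p marked hlen hfuel
    rw [A153893_loop]
    have : ¬ ((marked.length : Int) < n) := by rw [hlen]; omega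
    simp [this]
  | succ m ih =>
    intro n p marked hlen hfuel
    have hlt : (marked.length : Int) < n := by rw [hlen]; omega
    rw [A153893_loop, dif_pos hlt]
    have hp : (1 : Int) ≤ (2 : Int) ^ p := by exact_mod_cast Nat.one_le_two_pow
    have hjlt : (p : Int) + 1 < 2 * (3 * 2 ^ p - 1) := by
      have h1 : p < 2 ^ p := Nat.lt_two_pow_self
      have h3 : (p : Int) < 2 ^ p := by exact_mod_cast h1
      omega
    have hdiv : PySem.Int.floordiv (2 * (3 * 2 ^ p - 1) + ((p : Int) + 1))
        (2 * (3 * 2 ^ p - 1)) = 1 := by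
      rw [PySem.Int.floordiv_eq_iff_of_pos (by omega)]
      have : (0 : Int) ≤ (p : Int) := Int.natCast_nonneg p
      constructor <;> omega
    rw [hdiv]
    have e1 : (3 * 2 ^ p - 1) + ((3 * 2 ^ p - 1) + 1) = 3 * 2 ^ (p + 1) - (1 : Int) := by
      rw [pow_succ]; ring
    rw [e1]
    have e2 : (2 * (3 * 2 ^ p - 1) + ((p : Int) + 1)) + ((3 * 2 ^ (p + 1) - 1) + 2)
        = 2 * (3 * 2 ^ ((p + 1)) - 1) + (((p + 1 : Nat) : Int) + 1) := by
      push_cast; rw [pow_succ]; ring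
    show A153893_loop n (marked ++ [3 * 2 ^ (p + 1) - 1])
        ((2 * (3 * 2 ^ p - 1) + ((p : Int) + 1)) + ((3 * 2 ^ (p + 1) - 1) + 2))
        (3 * 2 ^ (p + 1) - 1)
      = marked ++ (List.range (m + 1)).map (fun i => 3 * 2 ^ (p + 1 + i) - 1)
    rw [e2]
    have hIH := ih n (p + 1) (marked ++ [3 * 2 ^ (p + 1) - 1])
      (by simp [hlen]) (by omega)
    rw [hIH, List.append_assoc]
    congr 1
    rw [List.range_succ_eq_map, List.map_cons, List.map_map]
    simp only [List.cons_append, List.nil_append, Nat.add_zero]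
    congr 1
    apply List.map_congr_left
    intro i _
    have hexp : p + 1 + (i + 1) = p + 1 + 1 + i := by omega
    simp [Function.comp, Nat.succ_eq_add_one, hexp]

lemma A153893_alt_eq_range (n : Int) :
    A153893_alt n = (List.range n.toNat).map (fun k => 3 * 2 ^ k - 1) := by
  unfold A153893_alt
  rw [PySem.List.pyRange_one, List.map_map, Int.sub_zero]
  apply List.map_congr_left
  intro k _
  simp

theorem A153893_spec : Claim_equal_A153893 := by
  intro n _
  unfold Spec_A153893 A153893
  rw [A153893_alt_eq_range]
  by_cases hn : n ≤ 0
  · rw [A153893_loop, dif_neg (by simp; omega)]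
    have h1 : n.toNat = 0 := by omega
    simp [h1]
  · rw [A153893_loop, dif_pos (by simp; omega)]
    have hdiv : PySem.Int.floordiv 1 (2 * 1) = 0 := by decide
    rw [hdiv]
    have hIH := A153893_loop_inv (n.toNat - 1) n 0 [1 + (1 + 0)] rfl rfl
    norm_num at hIH ⊢
    rw [hIH]
    have hsucc : n.toNat = (n.toNat - 1) + 1 := by omega
    rw [hsucc, List.range_succ_eq_map, List.map_cons, List.map_map]
    simp only [pow_zero]
    norm_num
    intro i _
    omega
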